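-- pv_equiv track=rewrite | github.com/snerror/DnD-Card-Generator | export.py | mix_array
-- ===== SOURCE A (Python) =====
-- def mix_array(arr, segment_size):
--     num_segments = len(arr) // segment_size + (
--         1 if len(arr) % segment_size != 0 else 0
--     )
--
--     new_order = []
--     for i in range(num_segments):
--         start = i * segment_size
--         end = min(start + segment_size, len(arr))
--         segment = arr[start:end]
--
--         segment = segment[::-1]
--
--         new_order.extend(segment)
--
--     return new_order
-- ===== SOURCE B (Python) =====
-- def mix_array(arr, segment_size):
--     n = len(arr)
--     num_segments = n // segment_size + (1 if n % segment_size != 0 else 0)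
--     if num_segments <= 0:
--         return []
--     s = segment_size
--     # map each output position to its source index by arithmetic
--     return [arr[min(i - i % s + s, n) - 1 - i % s] for i in range(n)]
-- ===== Notes on version B (the rewrite author's own statement) =====
-- stated objective: alternative
-- what changed: B replaces A's chunk-slice-reverse-extend loop by a single comprehension over output positions that computes each element's source index arithmetically (min(i - i%s + s, n) - 1 - i%s), after one up-front ceil-division deciding whether any segment exists.
import Mathlib
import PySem

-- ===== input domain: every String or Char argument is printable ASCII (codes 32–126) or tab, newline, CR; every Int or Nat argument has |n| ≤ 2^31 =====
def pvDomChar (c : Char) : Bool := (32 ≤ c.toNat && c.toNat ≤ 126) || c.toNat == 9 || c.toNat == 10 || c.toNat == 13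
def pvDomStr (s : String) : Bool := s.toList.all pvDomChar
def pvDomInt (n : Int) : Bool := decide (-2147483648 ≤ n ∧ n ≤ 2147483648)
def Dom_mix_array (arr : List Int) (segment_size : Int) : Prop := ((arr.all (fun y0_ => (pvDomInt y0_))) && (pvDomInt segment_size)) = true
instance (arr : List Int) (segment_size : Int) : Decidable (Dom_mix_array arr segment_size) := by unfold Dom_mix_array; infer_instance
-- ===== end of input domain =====

-- B reads each output element directly from its source position by index arithmetic
-- instead of A's slice-reverse-extend per chunk; same O(n) cost, different decomposition.

-- ===== PORT A =====
def mix_array (arr : List Int) (segment_size : Int) : List Int :=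
  let numSegments : Int := PySem.Int.floordiv (PySem.List.len arr) segment_size +
    (if PySem.Int.mod (PySem.List.len arr) segment_size ≠ 0 then 1 else 0)
  (PySem.List.pyRange 0 numSegments 1).foldl (fun newOrder i =>
    let start := i * segment_size
    let stop := min (start + segment_size) (PySem.List.len arr)
    let segment := PySem.List.slice arr (some start) (some stop)
    -- segment[::-1]: slice? with step -1 is always `some` (step ≠ 0), getD is exact here
    let segment := (PySem.List.slice? segment none none (-1)).getD []
    newOrder ++ segment) []

-- ===== PORT B =====
def mix_array_alt (arr : List Int) (segment_size : Int) : List Int :=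
  let n : Int := PySem.List.len arr
  let numSegments : Int := PySem.Int.floordiv n segment_size +
    (if PySem.Int.mod n segment_size ≠ 0 then 1 else 0)
  if numSegments ≤ 0 then []
  else
    -- arr[...] is exact as pyGetD: the computed index is provably in range here
    (PySem.List.pyRange 0 n 1).map (fun i =>
      PySem.List.pyGetD arr
        (min (i - PySem.Int.mod i segment_size + segment_size) n - 1 - PySem.Int.mod i segment_size) 0)

-- ===== PRECONDITION & SPEC =====
-- Pre_ excludes exactly segment_size = 0, where A raises ZeroDivisionError.
def Pre_mix_array (arr : List Int) (segment_size : Int) : Prop := segment_size ≠ 0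
instance (arr : List Int) (segment_size : Int) : Decidable (Pre_mix_array arr segment_size) := by unfold Pre_mix_array; infer_instance
def pvWitness_mix_array : List Int × Int := ([1, 2, 3, 4, 5], 2)

def Spec_mix_array (arr : List Int) (segment_size : Int) (out : List Int) : Prop := out = mix_array_alt arr segment_size
instance (arr : List Int) (segment_size : Int) (out : List Int) : Decidable (Spec_mix_array arr segment_size out) := by unfold Spec_mix_array; infer_instance

-- ===== CLAIM (what is proved, stated in full; the proofs are below) =====
def Claim_equal_mix_array : Prop := ∀ (arr : List Int) (segment_size : Int), Dom_mix_array arr segment_size → Pre_mix_array arr segment_size → Spec_mix_array arr segment_size (mix_array arr segment_size)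

-- ===== LEMMAS AND PROOFS =====

def ceilD (n s : Int) : Int :=
  PySem.Int.floordiv n s + (if PySem.Int.mod n s ≠ 0 then 1 else 0)

lemma A_flat (arr : List Int) (s : Int) :
    mix_array arr s = (PySem.List.pyRange 0 (ceilD (PySem.List.len arr) s) 1).flatMap
      (fun i => (PySem.List.slice arr (some (i*s)) (some (min (i*s+s) (PySem.List.len arr)))).reverse) := by
  simp [mix_array, ceilD, PySem.List.slice?_none_none_neg_one, List.flatMap_def]

lemma B_map (arr : List Int) (s : Int) (h : ¬ ceilD (PySem.List.len arr) s ≤ 0) :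
    mix_array_alt arr s = (PySem.List.pyRange 0 (PySem.List.len arr) 1).map (fun i =>
      PySem.List.pyGetD arr
        (min (i - PySem.Int.mod i s + s) (PySem.List.len arr) - 1 - PySem.Int.mod i s) 0) := by
  have h' : ¬ (PySem.Int.floordiv (PySem.List.len arr) s +
      (if PySem.Int.mod (PySem.List.len arr) s ≠ 0 then 1 else 0) ≤ 0) := by simpa [ceilD] using h
  simp only [mix_array_alt]
  rw [if_neg h']

lemma B_nil (arr : List Int) (s : Int) (h : ceilD (PySem.List.len arr) s ≤ 0) :
    mix_array_alt arr s = [] := by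
  have h' : (PySem.Int.floordiv (PySem.List.len arr) s +
      (if PySem.Int.mod (PySem.List.len arr) s ≠ 0 then 1 else 0) ≤ 0) := by simpa [ceilD] using h
  simp only [mix_array_alt]
  rw [if_pos h']

lemma mod_small {a s : Int} (h0 : 0 ≤ a) (hs : a < s) : PySem.Int.mod a s = a := by
  have hq : PySem.Int.floordiv a s = 0 :=
    (PySem.Int.floordiv_eq_iff_of_pos (by omega)).mpr (by constructor <;> omega)
  have := PySem.Int.floordiv_mul_add_mod a s
  rw [hq] at this; omega

lemma ceilD_zero {s : Int} (hs : s ≠ 0) : ceilD 0 s = 0 := by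
  rcases lt_or_gt_of_ne hs with h | h
  · have hq : PySem.Int.floordiv 0 s = 0 := by
      have hb := PySem.Int.mod_neg_bounds (a := 0) h
      have hm := PySem.Int.floordiv_mul_add_mod 0 s
      set q := PySem.Int.floordiv 0 s with hqd
      rcases lt_trichotomy q 0 with hq0 | hq0 | hq0
      · nlinarith
      · exact hq0
      · nlinarith
    have hm := PySem.Int.floordiv_mul_add_mod 0 s
    rw [hq] at hm
    simp [ceilD, hq]; omega
  · have hq : PySem.Int.floordiv 0 s = 0 :=
      (PySem.Int.floordiv_eq_iff_of_pos h).mpr (by constructor <;> omega)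
    have hm := PySem.Int.floordiv_mul_add_mod 0 s
    rw [hq] at hm
    simp [ceilD, hq]; omega

lemma fd_nonneg {n s : Int} (hs : 0 < s) (hn : 0 ≤ n) : 0 ≤ PySem.Int.floordiv n s := by
  have := (PySem.Int.le_floordiv_iff_mul_le (a := n) (b := s) (q := 0) hs).mpr (by omega)
  omega

lemma ceilD_pos {n s : Int} (hs : 0 < s) (hn : 0 < n) : 1 ≤ ceilD n s := by
  have hq := fd_nonneg hs hn.le
  have hm := PySem.Int.floordiv_mul_add_mod n s
  unfold ceilD
  split_ifs with h
  · -- mod ≠ 0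
    omega
  · -- mod = 0 : n = q * s, q ≥ 0, q ≠ 0
    rcases eq_or_lt_of_le hq with hq0 | hq0
    · rw [← hq0] at hm; omega
    · omega

lemma fd_shift {n s : Int} (hs : 0 < s) :
    PySem.Int.floordiv (n - s) s = PySem.Int.floordiv n s - 1 ∧
    PySem.Int.mod (n - s) s = PySem.Int.mod n s := by
  have hm := PySem.Int.floordiv_mul_add_mod n s
  have hr0 := PySem.Int.mod_nonneg (a := n) hs
  have hrs := PySem.Int.mod_lt (a := n) hs
  set q := PySem.Int.floordiv n s with hqd
  have hq : PySem.Int.floordiv (n - s) s = q - 1 := by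
    refine (PySem.Int.floordiv_eq_iff_of_pos hs).mpr ⟨?_, ?_⟩ <;> nlinarith
  refine ⟨hq, ?_⟩
  have hm2 := PySem.Int.floordiv_mul_add_mod (n - s) s
  rw [hq] at hm2; nlinarith

lemma ceilD_succ {n s : Int} (hs : 0 < s) : ceilD n s = ceilD (n - s) s + 1 := by
  obtain ⟨h1, h2⟩ := fd_shift (n := n) hs
  unfold ceilD
  rw [h1, h2]; ring

lemma ceilD_one {n s : Int} (hs : 0 < s) (h0 : 0 < n) (hns : n ≤ s) : ceilD n s = 1 := by
  have h := ceilD_succ (n := n) hs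
  have : ceilD (n - s) s = 0 := by
    rcases eq_or_lt_of_le hns with he | hl
    · rw [he]; simpa using ceilD_zero (by omega)
    · have hq : PySem.Int.floordiv (n - s) s = -1 :=
        (PySem.Int.floordiv_eq_iff_of_pos hs).mpr (by constructor <;> nlinarith)
      have hm := PySem.Int.floordiv_mul_add_mod (n - s) s
      rw [hq] at hm
      unfold ceilD
      rw [hq, if_pos (by omega)]
      omega
  omega

lemma ceilD_nonpos_of_neg {n s : Int} (hs : s < 0) (hn : 0 ≤ n) : ceilD n s ≤ 0 := by
  have hb := PySem.Int.mod_neg_bounds (a := n) hs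
  have hm := PySem.Int.floordiv_mul_add_mod n s
  set q := PySem.Int.floordiv n s with hqd
  unfold ceilD
  rw [← hqd]
  split_ifs with h
  · -- mod ≠ 0 : need q + 1 ≤ 0
    by_contra hc
    have hq0 : 0 ≤ q := by omega
    have hmlt : PySem.Int.mod n s < 0 := lt_of_le_of_ne hb.2 h
    nlinarith [mul_nonneg hq0 (by omega : (0:Int) ≤ -s)]
  · by_contra hc
    have hq0 : 0 ≤ q := by omega
    nlinarith [mul_nonneg hq0 (by omega : (0:Int) ≤ -s)]

lemma mod_le_self {a s : Int} (hs : 0 < s) (h0 : 0 ≤ a) : PySem.Int.mod a s ≤ a := by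
  have hq := fd_nonneg hs h0
  have hm := PySem.Int.floordiv_mul_add_mod a s
  nlinarith

lemma take_toNat_min (l : List Int) (s : Int) :
    l.take (min s (l.length : Int)).toNat = l.take s.toNat := by
  rcases le_total s (l.length : Int) with h | h
  · rw [min_eq_left h]
  · rw [min_eq_right h]
    rw [List.take_of_length_le (by omega), List.take_of_length_le (by omega)]

lemma stepA {s : Int} (hs : 0 < s) (x : Int) (xs : List Int) :
    mix_array (x :: xs) s =
      ((x :: xs).take s.toNat).reverse ++ mix_array ((x :: xs).drop s.toNat) s := by
  have hn0 : 0 < ((x :: xs).length : Int) := by exact_mod_cast Nat.succ_pos xs.length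
  rw [A_flat, A_flat]
  simp only [PySem.List.len_eq]
  have hm1 : 1 ≤ ceilD ((x :: xs).length : Int) s := ceilD_pos hs hn0
  rw [PySem.List.pyRange_one_cons (by omega)]
  rw [List.flatMap_cons]
  congr 1
  · -- head segment = (take s).reverse
    simp only [zero_mul, zero_add]
    rw [PySem.List.slice_zero_start, PySem.List.slice_to _ (le_min hs.le (by positivity))]
    rw [take_toNat_min]
  · -- tail
    by_cases hcase : ((x :: xs).length : Int) ≤ s
    · have harr' : (x :: xs).drop s.toNat = [] := List.drop_eq_nil_of_le (by omega)
      rw [harr']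
      simp only [List.length_nil, Nat.cast_zero, ceilD_zero (by omega : s ≠ 0)]
      rw [ceilD_one hs hn0 hcase]
      rw [PySem.List.pyRange_one_eq_nil (by omega : (1:Int) ≤ 0 + 1)]
      simp
    · push Not at hcase
      have hlen' : (((x :: xs).drop s.toNat).length : Int) = ((x :: xs).length : Int) - s := by
        rw [List.length_drop]; omega
      rw [hlen']
      have hms : ceilD (((x :: xs).length : Int) - s) s = ceilD ((x :: xs).length : Int) s - 1 := by
        have := ceilD_succ (n := ((x :: xs).length : Int)) hs; omega
      rw [hms]
      simp only [zero_add]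
      rw [PySem.List.pyRange_one 1 _, PySem.List.pyRange_one 0 _]
      simp only [List.flatMap_def, List.map_map, sub_zero]
      congr 1
      apply List.map_congr_left
      intro k _
      simp only [Function.comp_apply, zero_add]
      congr 1
      have h1' : ((1:Int)+(k:Int))*s = s + (k:Int)*s := by ring
      rw [h1']
      set t : Int := (k : Int) * s with ht
      have hk0 : 0 ≤ t := mul_nonneg (Int.natCast_nonneg k) hs.le
      clear_value t
      rw [PySem.List.slice_toNat _ (by omega) (by omega),
          PySem.List.slice_toNat _ (by omega) (by omega)]
      rw [List.drop_drop]
      rw [show (s + t).toNat = s.toNat + t.toNat from by omega]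
      congr 1
      omega

lemma getD_rev_take (l : List Int) (m : Nat) (hm : m ≤ l.length) :
    (List.range m).map (fun k => l.getD (m - 1 - k) 0) = (l.take m).reverse := by
  have hti : (l.take m).length = m := by simp [List.length_take]; omega
  apply List.ext_getElem
  · simp [hti]
  · intro i h1 h2
    simp only [List.length_map, List.length_range] at h1
    simp only [List.getElem_map, List.getElem_range, List.getElem_reverse, List.getElem_take, hti]
    rw [List.getD_eq_getElem l 0 (by omega)]

lemma stepB {s : Int} (hs : 0 < s) (x : Int) (xs : List Int) :
    mix_array_alt (x :: xs) s =
      ((x :: xs).take s.toNat).reverse ++ mix_array_alt ((x :: xs).drop s.toNat) s := by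
  have hn0 : 0 < ((x :: xs).length : Int) := by exact_mod_cast Nat.succ_pos xs.length
  have hm1 : 1 ≤ ceilD ((x :: xs).length : Int) s := ceilD_pos hs hn0
  rw [B_map _ _ (by simp only [PySem.List.len_eq]; omega)]
  simp only [PySem.List.len_eq]
  by_cases hcase : ((x :: xs).length : Int) ≤ s
  · -- the whole list is a single segment
    have harr' : (x :: xs).drop s.toNat = [] := List.drop_eq_nil_of_le (by omega)
    rw [harr', B_nil _ _ (by
      simp only [PySem.List.len_eq, List.length_nil, Nat.cast_zero]
      simp [ceilD_zero (by omega : s ≠ 0)])]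
    rw [List.take_of_length_le (by omega), List.append_nil]
    rw [PySem.List.pyRange_one 0 _]
    simp only [sub_zero, List.map_map, Int.toNat_natCast]
    rw [← List.take_length (l := x :: xs), ← getD_rev_take _ _ le_rfl]
    simp only [List.take_length]
    apply List.map_congr_left
    intro k hk
    simp only [List.mem_range] at hk
    simp only [Function.comp_apply, zero_add]
    rw [mod_small (by positivity) (by omega : ((k:Int)) < s)]
    rw [show ((k:Int)) - k + s = s from by ring]
    rw [min_eq_right hcase]
    rw [show ((x :: xs).length : Int) - 1 - k = (((x :: xs).length - 1 - k : Nat) : Int) from by omega]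
    rw [PySem.List.pyGetD_natCast]
  · -- s < length: first segment ++ rest
    push Not at hcase
    rw [PySem.List.pyRange_one_append 0 s _ hs.le hcase.le]
    rw [List.map_append]
    congr 1
    · -- first block
      rw [PySem.List.pyRange_one 0 s]
      simp only [sub_zero, List.map_map]
      rw [← getD_rev_take (x :: xs) s.toNat (by omega)]
      apply List.map_congr_left
      intro k hk
      simp only [List.mem_range] at hk
      simp only [Function.comp_apply, zero_add]
      rw [mod_small (by positivity) (by omega : ((k:Int)) < s)]
      rw [show ((k:Int)) - k + s = s from by ring]
      rw [min_eq_left hcase.le]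
      rw [show s - 1 - (k:Int) = ((s.toNat - 1 - k : Nat) : Int) from by omega]
      rw [PySem.List.pyGetD_natCast]
    · -- second block = B on the dropped list
      have hlen' : (((x :: xs).drop s.toNat).length : Int) = ((x :: xs).length : Int) - s := by
        rw [List.length_drop]; omega
      rw [B_map _ _ (by
        simp only [PySem.List.len_eq, hlen']
        have := ceilD_pos (n := ((x :: xs).length : Int) - s) hs (by omega)
        omega)]
      simp only [PySem.List.len_eq, hlen']
      rw [PySem.List.pyRange_one s _, PySem.List.pyRange_one 0 _]
      simp only [sub_zero, List.map_map]
      apply List.map_congr_left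
      intro k hk
      simp only [List.mem_range] at hk
      simp only [Function.comp_apply, zero_add]
      have hkltl : ((k:Int)) < ((x :: xs).length : Int) - s := by omega
      set r := PySem.Int.mod (k:Int) s with hr
      have hr0 : 0 ≤ r := PySem.Int.mod_nonneg (a := (k:Int)) hs
      have hrs : r < s := PySem.Int.mod_lt (a := (k:Int)) hs
      have hrk : r ≤ (k:Int) := mod_le_self hs (by positivity)
      have hmod : PySem.Int.mod (s + (k:Int)) s = r := by
        have h2 := (fd_shift (n := (k:Int) + s) hs).2
        simp only [add_sub_cancel_right] at h2
        rw [add_comm s ((k:Int))]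
        rw [← h2, hr]
      rw [hmod]
      set t := min ((k:Int) - r + s) (((x :: xs).length : Int) - s) - 1 - r with htd
      have ht0 : 0 ≤ t := by omega
      rw [show min (s + (k:Int) - r + s) ((x :: xs).length : Int) - 1 - r = s + t from by omega]
      rw [show t = ((t.toNat : Nat) : Int) from by omega]
      rw [show s + ((t.toNat : Nat) : Int) = ((s.toNat + t.toNat : Nat) : Int) from by omega]
      rw [PySem.List.pyGetD_natCast, PySem.List.pyGetD_natCast]
      simp only [List.getD_eq_getElem?_getD, List.getElem?_drop]

lemma A_empty {s : Int} (hs : s ≠ 0) : mix_array [] s = [] := by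
  rw [A_flat]
  simp only [PySem.List.len_eq, List.length_nil, Nat.cast_zero]
  rw [ceilD_zero hs, PySem.List.pyRange_one_eq_nil le_rfl]
  simp

lemma A_neg {s : Int} (hs : s < 0) (arr : List Int) : mix_array arr s = [] := by
  rw [A_flat]
  simp only [PySem.List.len_eq]
  have := ceilD_nonpos_of_neg (n := (arr.length : Int)) hs (by positivity)
  rw [PySem.List.pyRange_one_eq_nil (by omega)]
  simp

lemma main_pos (s : Int) (hs : 0 < s) :
    ∀ (N : Nat) (arr : List Int), arr.length ≤ N → mix_array arr s = mix_array_alt arr s := by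
  intro N
  induction N with
  | zero =>
    intro arr h
    have harr : arr = [] := List.eq_nil_of_length_eq_zero (by omega)
    subst harr
    rw [A_empty (by omega), B_nil _ _ (by
      simp only [PySem.List.len_eq, List.length_nil, Nat.cast_zero]
      rw [ceilD_zero (by omega)])]
  | succ N ih =>
    intro arr h
    cases arr with
    | nil =>
      rw [A_empty (by omega), B_nil _ _ (by
        simp only [PySem.List.len_eq, List.length_nil, Nat.cast_zero]
        rw [ceilD_zero (by omega)])]
    | cons x xs =>
      rw [stepA hs, stepB hs, ih _ (by simp only [List.length_drop]; simp at h ⊢; omega)]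


-- ===== VERDICT (by name: the statement is the Claim_ definition above) =====
theorem mix_array_spec : Claim_equal_mix_array := by
  intro arr s _ hpre
  unfold Spec_mix_array
  rcases lt_trichotomy s 0 with h | h | h
  · rw [A_neg h, B_nil _ _ (by
      simp only [PySem.List.len_eq]
      exact ceilD_nonpos_of_neg h (by positivity))]
  · exact absurd h hpre
  · exact main_pos s h arr.length arr le_rfl
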